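-- pv_equiv track=rewrite | github.com/SzczepanGrela/AiSD | Lab2/3_3_poprawnosc.py | poprawnosc
-- ===== SOURCE A (Python) =====
-- class stack():
--     def __init__(self):
--         self.stack = list()
--
--     def isEmpty(self):
--         return len(self.stack) <=0
--
--     def push(self,item):
--         self.stack.append(item)
--
--     def pop(self):
--         if self.isEmpty(): return None
--         else: return self.stack.pop()
--
--     def peek(self):
--         if self.isEmpty():
--             return None
--         else: return self.stack[len(self.stack)-1]
--
--     def __str__(self):
--         return str(self.stack)
--
-- def czylitera(a):
--     if ord(a)>=65 and ord(a)<=90: return "WL"   ## wielka litera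
--     elif ord(a)>=97 and ord(a)<122: return "ML" ## mała litera
--     elif ord(a)>=48 and ord(a)<=57: return "C"  ##cyfra
--     elif a==' ': return "Space"
--     else: return "NL"  ## nie jest to litera
--
-- def poprawnosc(tekst):
--     slowo=stack()
--     b="W zdanie występuje błąd"
--     popr="Zdanie poprawne"
--
--     for i in tekst:
--         if not slowo.isEmpty(): p=k   ## p przechowuje informacje o typie poprzedniego znaku
--         k=czylitera(i)
--
--
--         if k=='Space': slowo=stack()   ### Resetowanie stosu przy odstępach w zdaniu
--
--         elif k=='ML':
--
--             if  slowo.isEmpty() or p!='C' and p!='NL':  ### mała litera może występować tylko po innych literach lub na poczatku slowa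
--                 slowo.push(i)
--
--             else: return b
--
--         elif k=='WL':                  ### Wielkie litery jedynie na początku zdania
--             if slowo.isEmpty(): slowo.push(i)
--             else: return b
--
--         elif k=='C':
--             if slowo.isEmpty() or czylitera(slowo.peek())=='C':     ##cyfry dopuszczone jedynie z cyframi
--                 slowo.push(i)
--             else: return b
--
--         elif k=='NL':           #Znaki mogą występować tylko na końcu poszczególnych słów
--             slowo.push(i)
--
--         else: return b
--
--     return popr
-- ===== SOURCE B (Python) =====
-- def czylitera(a):
--     if ord(a)>=65 and ord(a)<=90: return "WL"   ## wielka litera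
--     elif ord(a)>=97 and ord(a)<122: return "ML" ## mała litera
--     elif ord(a)>=48 and ord(a)<=57: return "C"  ##cyfra
--     elif a==' ': return "Space"
--     else: return "NL"  ## nie jest to litera
--
-- def poprawnosc(tekst):
--     blad = "W zdanie występuje błąd"
--     # stateless pairwise scan: every adjacent pair must obey the rules
--     for a, b in zip(tekst, tekst[1:]):
--         ta, tb = czylitera(a), czylitera(b)
--         if ta == 'Space' or tb == 'Space':
--             continue
--         if tb == 'WL':
--             return blad
--         if tb == 'ML' and (ta == 'C' or ta == 'NL'):
--             return blad
--         if tb == 'C' and ta != 'C':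
--             return blad
--     return "Zdanie poprawne"
-- ===== Notes on version B (the rewrite author's own statement) =====
-- stated objective: simpler
-- what changed: Replaces A's mutable stack class and per-word state machine by a stateless scan over adjacent character pairs (zip(tekst, tekst[1:])): each pair is checked against the rules directly, with pairs touching a space skipped, no stack and no previous-type bookkeeping.
import Mathlib
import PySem

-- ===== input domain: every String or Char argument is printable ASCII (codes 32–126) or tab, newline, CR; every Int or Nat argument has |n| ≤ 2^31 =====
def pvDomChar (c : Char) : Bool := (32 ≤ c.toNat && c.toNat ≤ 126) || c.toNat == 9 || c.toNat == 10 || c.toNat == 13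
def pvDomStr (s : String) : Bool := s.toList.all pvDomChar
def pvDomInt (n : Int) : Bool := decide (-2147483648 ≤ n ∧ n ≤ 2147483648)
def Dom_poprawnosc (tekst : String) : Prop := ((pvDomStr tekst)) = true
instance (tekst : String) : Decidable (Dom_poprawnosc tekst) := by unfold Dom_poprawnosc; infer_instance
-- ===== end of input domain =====

-- B replaces A's stack machine by a stateless scan over adjacent character pairs
-- (zip(tekst, tekst[1:])): simpler, no mutable word state.

-- ===== PORT A =====
def czylitera (a : Char) : String :=
  if a.toNat ≥ 65 ∧ a.toNat ≤ 90 then "WL"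
  else if a.toNat ≥ 97 ∧ a.toNat < 122 then "ML"
  else if a.toNat ≥ 48 ∧ a.toNat ≤ 57 then "C"
  else if a = ' ' then "Space"
  else "NL"

-- A's loop: state = (slowo = the stack's list, p, k).  push = append at the end,
-- peek = last element (getLastD ' ': only read when the isEmpty test already failed,
-- exactly like Python's short-circuit guards around slowo.peek()).
def poprawnoscLoop : List Char → List Char → String → String → String
  | [], _slowo, _p, _k => "Zdanie poprawne"
  | i :: rest, slowo, p, k =>
    let p := if ¬ slowo.isEmpty then k else p
    let k := czylitera i
    if k = "Space" then poprawnoscLoop rest [] p k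
    else if k = "ML" then
      if slowo.isEmpty ∨ (p ≠ "C" ∧ p ≠ "NL") then poprawnoscLoop rest (slowo ++ [i]) p k
      else "W zdanie występuje błąd"
    else if k = "WL" then
      if slowo.isEmpty then poprawnoscLoop rest (slowo ++ [i]) p k
      else "W zdanie występuje błąd"
    else if k = "C" then
      if slowo.isEmpty ∨ czylitera (slowo.getLastD ' ') = "C" then
        poprawnoscLoop rest (slowo ++ [i]) p k
      else "W zdanie występuje błąd"
    else if k = "NL" then poprawnoscLoop rest (slowo ++ [i]) p k
    else "W zdanie występuje błąd"

def poprawnosc (tekst : String) : String :=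
  poprawnoscLoop tekst.toList [] "" ""

-- ===== PORT B =====
-- Source B's loop over zip(tekst, tekst[1:]), early-returning the error string.
def poprawnoscAltLoop : List (Char × Char) → String
  | [] => "Zdanie poprawne"
  | (a, b) :: rest =>
    let ta := czylitera a
    let tb := czylitera b
    if ta = "Space" ∨ tb = "Space" then poprawnoscAltLoop rest
    else if tb = "WL" then "W zdanie występuje błąd"
    else if tb = "ML" ∧ (ta = "C" ∨ ta = "NL") then "W zdanie występuje błąd"
    else if tb = "C" ∧ ta ≠ "C" then "W zdanie występuje błąd"
    else poprawnoscAltLoop rest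

def poprawnosc_alt (tekst : String) : String :=
  poprawnoscAltLoop (tekst.toList.zip (PySem.List.slice tekst.toList (some 1) none))

-- ===== PRECONDITION & SPEC =====
def Spec_poprawnosc (tekst : String) (out : String) : Prop := out = poprawnosc_alt tekst
instance (tekst : String) (out : String) : Decidable (Spec_poprawnosc tekst out) := by unfold Spec_poprawnosc; infer_instance

-- ===== CLAIM (what is proved, stated in full; the proofs are below) =====
def Claim_equal_poprawnosc : Prop := ∀ (tekst : String), Dom_poprawnosc tekst → Spec_poprawnosc tekst (poprawnosc tekst)

-- ===== LEMMAS AND PROOFS =====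

lemma czylitera_cases (c : Char) :
    czylitera c = "WL" ∨ czylitera c = "ML" ∨ czylitera c = "C" ∨
    czylitera c = "Space" ∨ czylitera c = "NL" := by
  unfold czylitera; split_ifs <;> simp

-- Invariant: c is the character A processed last.  Either it was a space (stack
-- just reset) or it sits on top of the stack with k its recorded type.
lemma loop_eq (cs : List Char) : ∀ (slowo : List Char) (p k : String) (c : Char),
    ((czylitera c = "Space" ∧ slowo = []) ∨
      (slowo ≠ [] ∧ slowo.getLastD ' ' = c ∧ k = czylitera c ∧ czylitera c ≠ "Space")) →
    poprawnoscLoop cs slowo p k = poprawnoscAltLoop ((c :: cs).zip cs) := by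
  induction cs with
  | nil => intro slowo p k c _; cases slowo <;> simp [poprawnoscLoop, poprawnoscAltLoop]
  | cons i rest ih =>
    intro slowo p k c hinv
    have hz : (c :: i :: rest).zip (i :: rest) = (c, i) :: ((i :: rest).zip rest) := by
      simp [List.zip]
    rcases hinv with ⟨hc, hsl⟩ | ⟨hne, hlast, hk, hcs⟩
    · -- word start: previous char was a space, stack empty
      subst hsl
      rcases czylitera_cases i with hi | hi | hi | hi | hi
      · simp [poprawnoscLoop, poprawnoscAltLoop, hz, hc, hi]
        exact ih [i] p "WL" i (Or.inr ⟨by simp, by simp, hi.symm, by simp [hi]⟩)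
      · simp [poprawnoscLoop, poprawnoscAltLoop, hz, hc, hi]
        exact ih [i] p "ML" i (Or.inr ⟨by simp, by simp, hi.symm, by simp [hi]⟩)
      · simp [poprawnoscLoop, poprawnoscAltLoop, hz, hc, hi]
        exact ih [i] p "C" i (Or.inr ⟨by simp, by simp, hi.symm, by simp [hi]⟩)
      · simp [poprawnoscLoop, poprawnoscAltLoop, hz, hc, hi]
        exact ih [] p "Space" i (Or.inl ⟨hi, rfl⟩)
      · simp [poprawnoscLoop, poprawnoscAltLoop, hz, hc, hi]
        exact ih [i] p "NL" i (Or.inr ⟨by simp, by simp, hi.symm, by simp [hi]⟩)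
    · -- inside a word: previous char c is on top of the stack
      have hE : slowo.isEmpty = false := by
        cases slowo with | nil => exact absurd rfl hne | cons _ _ => rfl
      rw [List.getLastD_eq_getLast?] at hlast
      subst hk
      rcases czylitera_cases i with hi | hi | hi | hi | hi
      · -- WL: A errors (stack nonempty); B errors (tb = WL)
        simp [poprawnoscLoop, poprawnoscAltLoop, hz, hE, hi, hcs]
      · -- ML
        by_cases hml : czylitera c = "C" ∨ czylitera c = "NL"
        · rcases hml with h | h <;>
            simp [poprawnoscLoop, poprawnoscAltLoop, hz, hE, hi, h]
        · rw [not_or] at hml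
          simp [poprawnoscLoop, poprawnoscAltLoop, hz, hE, hi, hcs, hml.1, hml.2]
          exact ih (slowo ++ [i]) (czylitera c) "ML" i
            (Or.inr ⟨by simp, by simp, hi.symm, by simp [hi]⟩)
      · -- C
        by_cases hcC : czylitera c = "C"
        · simp [poprawnoscLoop, poprawnoscAltLoop, hz, hE, hi, hlast, hcC]
          exact ih (slowo ++ [i]) "C" "C" i
            (Or.inr ⟨by simp, by simp, hi.symm, by simp [hi]⟩)
        · simp [poprawnoscLoop, poprawnoscAltLoop, hz, hE, hi, hcs, hlast, hcC]
      · -- Space: reset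
        simp [poprawnoscLoop, poprawnoscAltLoop, hz, hE, hi, hcs]
        exact ih [] (czylitera c) "Space" i (Or.inl ⟨hi, rfl⟩)
      · -- NL: always pushed, B\'s final else
        simp [poprawnoscLoop, poprawnoscAltLoop, hz, hE, hi, hcs]
        exact ih (slowo ++ [i]) (czylitera c) "NL" i
          (Or.inr ⟨by simp, by simp, hi.symm, by simp [hi]⟩)

-- ===== VERDICT (by name: the statement is the Claim_ definition above) =====
theorem poprawnosc_spec : Claim_equal_poprawnosc := by
  intro tekst _
  unfold Spec_poprawnosc poprawnosc poprawnosc_alt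
  rw [PySem.List.slice_from_one]
  cases htl : tekst.toList with
  | nil => simp [poprawnoscLoop, poprawnoscAltLoop]
  | cons i rest =>
    have htail : (i :: rest).tail = rest := rfl
    rw [htail]
    rcases czylitera_cases i with hi | hi | hi | hi | hi
    · simp [poprawnoscLoop, hi]
      exact loop_eq rest [i] "" "WL" i (Or.inr ⟨by simp, by simp, hi.symm, by simp [hi]⟩)
    · simp [poprawnoscLoop, hi]
      exact loop_eq rest [i] "" "ML" i (Or.inr ⟨by simp, by simp, hi.symm, by simp [hi]⟩)
    · simp [poprawnoscLoop, hi]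
      exact loop_eq rest [i] "" "C" i (Or.inr ⟨by simp, by simp, hi.symm, by simp [hi]⟩)
    · simp [poprawnoscLoop, hi]
      exact loop_eq rest [] "" "Space" i (Or.inl ⟨hi, rfl⟩)
    · simp [poprawnoscLoop, hi]
      exact loop_eq rest [i] "" "NL" i (Or.inr ⟨by simp, by simp, hi.symm, by simp [hi]⟩)
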